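-- pv_equiv track=rewrite | github.com/joyhpc/opendatasheet | extractors/electrical.py | get_supported_modes
-- ===== SOURCE A (Python) =====
-- def get_supported_modes(min_val, typ_val, max_val):
--     """Infer supported layout modes: ALGEBRAIC or MAGNITUDE."""
--     vals = [v for v in [min_val, typ_val, max_val] if v is not None]
--     if len(vals) <= 1:
--         modes = ['ALGEBRAIC']
--         if not vals or vals[0] <= 0:
--             modes.append('MAGNITUDE')
--         return modes
--     modes = []
--     if all(vals[i] <= vals[i+1] for i in range(len(vals)-1)):
--         modes.append('ALGEBRAIC')
--     if all(vals[i] >= vals[i+1] for i in range(len(vals)-1)) and all(v <= 0 for v in vals):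
--         modes.append('MAGNITUDE')
--     return modes
-- ===== SOURCE B (Python) =====
-- def get_supported_modes(min_val, typ_val, max_val):
--     """Infer supported layout modes: ALGEBRAIC or MAGNITUDE."""
--     vals = [v for v in (min_val, typ_val, max_val) if v is not None]
--     modes = []
--     if vals == sorted(vals):
--         modes.append('ALGEBRAIC')
--     if vals == sorted(vals, reverse=True) and all(v <= 0 for v in vals):
--         modes.append('MAGNITUDE')
--     return modes
-- ===== Notes on version B (the rewrite author's own statement) =====
-- stated objective: simpler
-- what changed: Replaces A's len<=1 special case plus index-based pairwise all() scans with a single uniform comparison of vals against sorted(vals) (and sorted(vals, reverse=True) for MAGNITUDE), which handles the empty and singleton cases for free.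
import Mathlib
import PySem

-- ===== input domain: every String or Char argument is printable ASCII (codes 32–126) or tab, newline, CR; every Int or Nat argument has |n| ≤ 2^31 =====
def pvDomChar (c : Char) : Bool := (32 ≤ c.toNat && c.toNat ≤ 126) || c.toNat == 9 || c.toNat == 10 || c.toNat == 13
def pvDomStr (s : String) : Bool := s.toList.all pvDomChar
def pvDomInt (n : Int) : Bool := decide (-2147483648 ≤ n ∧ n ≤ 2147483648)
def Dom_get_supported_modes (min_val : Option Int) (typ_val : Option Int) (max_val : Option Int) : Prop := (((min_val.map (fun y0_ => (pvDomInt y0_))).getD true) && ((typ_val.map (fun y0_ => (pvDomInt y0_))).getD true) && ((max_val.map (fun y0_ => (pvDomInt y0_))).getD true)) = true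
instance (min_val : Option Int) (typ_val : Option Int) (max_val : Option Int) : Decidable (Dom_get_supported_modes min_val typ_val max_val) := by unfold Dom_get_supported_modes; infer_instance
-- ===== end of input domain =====

-- ===== PORT A =====
-- B replaces A's len<=1 special case and index-based pairwise all() scans with
-- uniform vals == sorted(vals) / sorted(vals, reverse=True) comparisons; objective: simpler.
def get_supported_modes (min_val : Option Int) (typ_val : Option Int) (max_val : Option Int) : List String :=
  let vals : List Int := [min_val, typ_val, max_val].filterMap id
  if vals.length ≤ 1 then
    let modes : List String := ["ALGEBRAIC"]
    if vals = [] ∨ PySem.List.pyGetD vals 0 0 ≤ 0 then modes ++ ["MAGNITUDE"] else modes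
  else
    let modes : List String := []
    let modes := if (PySem.List.pyRange 0 ((vals.length : Int) - 1) 1).all
        (fun i => decide (PySem.List.pyGetD vals i 0 ≤ PySem.List.pyGetD vals (i + 1) 0)) then
        modes ++ ["ALGEBRAIC"] else modes
    let modes := if ((PySem.List.pyRange 0 ((vals.length : Int) - 1) 1).all
        (fun i => decide (PySem.List.pyGetD vals i 0 ≥ PySem.List.pyGetD vals (i + 1) 0)) &&
        vals.all (fun v => decide (v ≤ 0))) then
        modes ++ ["MAGNITUDE"] else modes
    modes

-- ===== PORT B =====
def get_supported_modes_alt (min_val : Option Int) (typ_val : Option Int) (max_val : Option Int) : List String :=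
  let vals : List Int := [min_val, typ_val, max_val].filterMap id
  let modes : List String := []
  let modes := if vals = PySem.List.sorted vals (fun v => v) false then modes ++ ["ALGEBRAIC"] else modes
  let modes := if vals = PySem.List.sorted vals (fun v => v) true ∧ vals.all (fun v => decide (v ≤ 0)) then
      modes ++ ["MAGNITUDE"] else modes
  modes

-- ===== PRECONDITION & SPEC =====
def Spec_get_supported_modes (min_val : Option Int) (typ_val : Option Int) (max_val : Option Int) (out : List String) : Prop := out = get_supported_modes_alt min_val typ_val max_val
instance (min_val : Option Int) (typ_val : Option Int) (max_val : Option Int) (out : List String) : Decidable (Spec_get_supported_modes min_val typ_val max_val out) := by unfold Spec_get_supported_modes; infer_instance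

-- ===== CLAIM (what is proved, stated in full; the proofs are below) =====
def Claim_equal_get_supported_modes : Prop := ∀ (min_val : Option Int) (typ_val : Option Int) (max_val : Option Int), Dom_get_supported_modes min_val typ_val max_val → Spec_get_supported_modes min_val typ_val max_val (get_supported_modes min_val typ_val max_val)

-- ===== LEMMAS AND PROOFS =====
theorem sorted_id_self_iff (l : List Int) :
    (l = PySem.List.sorted l (fun v => v) false) ↔ l.Pairwise (fun a b => a ≤ b) := by
  constructor
  · intro h; rw [h]; exact PySem.List.sorted_pairwise l (fun v => v)
  · intro h; exact (PySem.List.sorted_eq_self_of_pairwise l (fun v => v) h).symm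

theorem sorted_id_rev_self_iff (l : List Int) :
    (l = PySem.List.sorted l (fun v => v) true) ↔ l.Pairwise (fun a b => b ≤ a) := by
  constructor
  · intro h; rw [h]; exact PySem.List.sorted_pairwise_rev l (fun v => v)
  · intro h; exact (PySem.List.sorted_rev_eq_self_of_pairwise l (fun v => v) h).symm

theorem pyRange01 : PySem.List.pyRange 0 1 1 = [0] := by decide
theorem pyRange02 : PySem.List.pyRange 0 2 1 = [0, 1] := by decide
theorem pg3_0 (a b c : Int) : PySem.List.pyGetD [a, b, c] 0 0 = a := rfl
theorem pg3_1 (a b c : Int) : PySem.List.pyGetD [a, b, c] 1 0 = b := rfl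
theorem pg3_2 (a b c : Int) : PySem.List.pyGetD [a, b, c] 2 0 = c := rfl
theorem pg2_0 (a b : Int) : PySem.List.pyGetD [a, b] 0 0 = a := rfl
theorem pg2_1 (a b : Int) : PySem.List.pyGetD [a, b] 1 0 = b := rfl

-- ===== VERDICT (by name: the statement is the Claim_ definition above) =====
theorem get_supported_modes_spec : Claim_equal_get_supported_modes := by
  intro m t x _
  unfold Spec_get_supported_modes
  rcases m with _ | a <;> rcases t with _ | b <;> rcases x with _ | c <;>
    first
    | decide
    | · simp only [get_supported_modes, get_supported_modes_alt,
          List.filterMap_cons, List.filterMap_nil, id,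
          List.length_cons, List.length_nil]
        norm_num [sorted_id_self_iff, sorted_id_rev_self_iff, pyRange01, pyRange02,
          pg3_0, pg3_1, pg3_2, pg2_0, pg2_1,
          List.pairwise_cons, List.all_cons, List.all_nil, decide_eq_true_eq]
        try (split_ifs <;> first | rfl | omega)
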